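-- pv_equiv track=rewrite | github.com/Looluu-cmyk/2026-recruitment-technical-assessment | backend/py_template/devdonalds.py | parse_handwriting
-- ===== SOURCE A (Python) =====
-- from typing import List, Dict, Union
--
-- def parse_handwriting(recipeName: str) -> Union[str | None]:
-- 	# TODO: implement me
-- 	fixedRecipeName = " ".join(
-- 		''.join(
-- 			[c for c in recipeName.replace('-', ' ').replace('_', ' ').lower() if c.isalpha() or c == ' ']
-- 		).split()
-- 	).title()
--
-- 	if len(fixedRecipeName) == 0:
-- 		return None
-- 	return fixedRecipeName
-- ===== SOURCE B (Python) =====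
-- def parse_handwriting(recipeName):
--     words = []
--     buf = []
--     for c in recipeName:
--         if c.isalpha():
--             buf.append(c.lower())
--         elif c in ' -_':
--             if buf:
--                 words.append(buf)
--                 buf = []
--     if buf:
--         words.append(buf)
--     if not words:
--         return None
--     return ' '.join(w[0].upper() + ''.join(w[1:]) for w in words)
-- ===== Notes on version B (the rewrite author's own statement) =====
-- stated objective: alternative
-- what changed: Replaces A's six-stage string pipeline (replace, replace, lower, filter, split, join, title) with a single left-to-right scan that maintains a current-word buffer and a word list, flushing on the three separator characters (space, hyphen, underscore) and capitalizing each collected word once at the end.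
import Mathlib
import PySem

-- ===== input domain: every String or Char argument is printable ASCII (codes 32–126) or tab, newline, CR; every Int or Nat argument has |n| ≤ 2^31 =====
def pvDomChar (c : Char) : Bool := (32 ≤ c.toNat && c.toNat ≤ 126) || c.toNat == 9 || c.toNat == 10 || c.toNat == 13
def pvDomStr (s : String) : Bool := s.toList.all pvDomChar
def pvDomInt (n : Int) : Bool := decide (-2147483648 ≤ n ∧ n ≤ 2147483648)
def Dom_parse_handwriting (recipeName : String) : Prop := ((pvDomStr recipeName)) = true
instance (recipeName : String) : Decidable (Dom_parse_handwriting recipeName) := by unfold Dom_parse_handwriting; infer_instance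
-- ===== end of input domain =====

-- B replaces A's staged string pipeline by a single scan with a word buffer (objective: alternative, same cost).

-- ===== PORT A =====
-- hand port of Python str.title(): uppercase an alpha char after a non-alpha, lowercase after an alpha
-- (exact for ASCII-alpha 'cased' characters, which is all this program feeds it)
def pyTitleGo : List Char → Bool → List Char
  | [], _ => []
  | c :: rest, prevAlpha =>
    if PySem.Chars.isalpha c then
      (if prevAlpha then PySem.Chars.lowerChar c else PySem.Chars.upperChar c) :: pyTitleGo rest true
    else c :: pyTitleGo rest false

def parse_handwriting (recipeName : String) : Option String :=
  let cleaned := PySem.Chars.lower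
    (PySem.Chars.replace (PySem.Chars.replace recipeName.toList ['-'] [' ']) ['_'] [' '])
  let filtered := cleaned.filter (fun c => PySem.Chars.isalpha c || c == ' ')
  let fixedRecipeName := pyTitleGo (PySem.Chars.join [' '] (PySem.Chars.split₀ filtered)) false
  if fixedRecipeName.length = 0 then none else some (String.ofList fixedRecipeName)

-- ===== PORT B =====
def altCap : List Char → List Char
  | [] => []
  | c :: r => PySem.Chars.upperChar c :: r

def altStep (st : List (List Char) × List Char) (c : Char) : List (List Char) × List Char :=
  if PySem.Chars.isalpha c then (st.1, st.2 ++ [PySem.Chars.lowerChar c])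
  else if c == ' ' || c == '-' || c == '_' then
    if st.2.isEmpty then st else (st.1 ++ [st.2], [])
  else st

def parse_handwriting_alt (recipeName : String) : Option String :=
  let st := recipeName.toList.foldl altStep ([], [])
  let words := if st.2.isEmpty then st.1 else st.1 ++ [st.2]
  if words.isEmpty then none
  else some (String.ofList (PySem.Chars.join [' '] (words.map altCap)))

-- ===== PRECONDITION & SPEC =====
def Spec_parse_handwriting (recipeName : String) (out : Option String) : Prop := out = parse_handwriting_alt recipeName
instance (recipeName : String) (out : Option String) : Decidable (Spec_parse_handwriting recipeName out) := by unfold Spec_parse_handwriting; infer_instance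

-- ===== CLAIM (what is proved, stated in full; the proofs are below) =====
def Claim_equal_parse_handwriting : Prop := ∀ (recipeName : String), Dom_parse_handwriting recipeName → Spec_parse_handwriting recipeName (parse_handwriting recipeName)

-- ===== LEMMAS AND PROOFS =====

-- character-class facts
theorem pvIsupper_iff (c : Char) : PySem.Chars.isupper c = true ↔ 65 ≤ c.toNat ∧ c.toNat ≤ 90 := by
  simp only [PySem.Chars.isupper, Bool.and_eq_true, decide_eq_true_eq, Char.le_def,
    UInt32.le_iff_toNat_le]
  rfl

theorem pvIslower_iff (c : Char) : PySem.Chars.islower c = true ↔ 97 ≤ c.toNat ∧ c.toNat ≤ 122 := by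
  simp only [PySem.Chars.islower, Bool.and_eq_true, decide_eq_true_eq, Char.le_def,
    UInt32.le_iff_toNat_le]
  rfl

theorem pvToNat_lowerChar_of_upper (c : Char) (h : PySem.Chars.isupper c = true) :
    (PySem.Chars.lowerChar c).toNat = c.toNat + 32 := by
  rw [PySem.Chars.lowerChar, if_pos h, Char.toNat_ofNat, if_pos]
  exact Or.inl (by rw [pvIsupper_iff] at h; omega)

theorem pvLowerChar_of_not_upper (c : Char) (h : PySem.Chars.isupper c = false) :
    PySem.Chars.lowerChar c = c := by
  rw [PySem.Chars.lowerChar, if_neg]; simp [h]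

theorem pvLowerChar_of_not_alpha (c : Char) (h : PySem.Chars.isalpha c = false) :
    PySem.Chars.lowerChar c = c := by
  apply pvLowerChar_of_not_upper
  simpa [PySem.Chars.isalpha] using (Bool.or_eq_false_iff.mp h).1

theorem pvIslower_lowerChar (c : Char) (h : PySem.Chars.isalpha c = true) :
    PySem.Chars.islower (PySem.Chars.lowerChar c) = true := by
  rw [PySem.Chars.isalpha, Bool.or_eq_true] at h
  rcases h with h | h
  · rw [pvIslower_iff, pvToNat_lowerChar_of_upper c h]
    rw [pvIsupper_iff] at h; omega
  · rw [pvLowerChar_of_not_upper c ?_]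
    · exact h
    · rw [pvIslower_iff] at h
      rw [← Bool.not_eq_true, pvIsupper_iff]; omega

theorem pvIsalpha_of_islower (c : Char) (h : PySem.Chars.islower c = true) :
    PySem.Chars.isalpha c = true := by
  rw [PySem.Chars.isalpha, h, Bool.or_true]

theorem pvLowerChar_of_islower (c : Char) (h : PySem.Chars.islower c = true) :
    PySem.Chars.lowerChar c = c := by
  apply pvLowerChar_of_not_upper
  rw [pvIslower_iff] at h
  rw [← Bool.not_eq_true, pvIsupper_iff]; omega

theorem pvToNat_eq_iff (c d : Char) : c = d ↔ c.toNat = d.toNat := by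
  constructor
  · rintro rfl; rfl
  · intro h
    have := Char.ofNat_toNat c
    rw [h, Char.ofNat_toNat] at this
    exact this.symm

theorem pvAlpha_ne_space (c : Char) (h : PySem.Chars.isalpha c = true) : ¬ (c = ' ') := by
  rw [PySem.Chars.isalpha, Bool.or_eq_true, pvIsupper_iff, pvIslower_iff] at h
  rw [pvToNat_eq_iff]
  show ¬ (c.toNat = 32); omega

theorem pvAlpha_not_space (c : Char) (h : PySem.Chars.isalpha c = true) :
    PySem.Chars.isspace c = false := by
  rw [PySem.Chars.isalpha, Bool.or_eq_true, pvIsupper_iff, pvIslower_iff] at h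
  simp only [PySem.Chars.isspace, Bool.or_eq_false_iff, Bool.and_eq_false_iff,
    decide_eq_false_iff_not]
  omega

theorem pvAlpha_ne_dash (c : Char) (h : PySem.Chars.isalpha c = true) : ¬ (c = '-' ∨ c = '_') := by
  rw [PySem.Chars.isalpha, Bool.or_eq_true, pvIsupper_iff, pvIslower_iff] at h
  rw [pvToNat_eq_iff, pvToNat_eq_iff]
  show ¬ (c.toNat = 45 ∨ c.toNat = 95); omega

-- per-character effect of A's replace/replace/lower stage
def pvCleanF (c : Char) : Char := PySem.Chars.lowerChar (if c = '-' ∨ c = '_' then ' ' else c)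

def pvP (c : Char) : Bool := PySem.Chars.isalpha c || c == ' '

def pvClean (l : List Char) : List Char := (l.map pvCleanF).filter pvP

-- single-character replace is a map
theorem pvReplaceGo_single (o : Char) (l : List Char) :
    ∀ (fuel : Nat) (acc : List Char), l.length ≤ fuel →
      PySem.Chars.replace.go [o] [' '] fuel l acc
        = acc.reverse ++ l.map (fun c => if c = o then ' ' else c) := by
  induction l with
  | nil =>
    intro fuel acc _
    cases fuel <;> simp [PySem.Chars.replace.go]
  | cons c t ih =>
    intro fuel acc hf
    cases fuel with
    | zero => simp at hf
    | succ f =>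
      rw [PySem.Chars.replace.go]
      by_cases hco : c = o
      · subst hco
        have hpre : [c].isPrefixOf (c :: t) = true := by simp [List.isPrefixOf]
        rw [if_pos hpre]
        simp only [List.length_singleton, List.drop_one, List.tail_cons, List.reverse_singleton,
          List.singleton_append]
        rw [ih f (' ' :: acc) (by simpa using hf)]
        simp
      · have hpre : [o].isPrefixOf (c :: t) = false := by
          simp [List.isPrefixOf, Ne.symm hco]
        rw [if_neg (by simp [hpre])]
        rw [ih f (c :: acc) (by simpa using hf)]
        simp [hco]

theorem pvReplace_single (o : Char) (l : List Char) :
    PySem.Chars.replace l [o] [' '] = l.map (fun c => if c = o then ' ' else c) := by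
  rw [PySem.Chars.replace, if_neg (by simp)]
  simpa using pvReplaceGo_single o l l.length [] le_rfl

-- the cleaned-and-filtered character list of A equals pvClean
theorem pvFiltered_eq (l : List Char) :
    (PySem.Chars.lower
        (PySem.Chars.replace (PySem.Chars.replace l ['-'] [' ']) ['_'] [' '])).filter
        (fun c => PySem.Chars.isalpha c || c == ' ') = pvClean l := by
  rw [pvReplace_single, pvReplace_single, PySem.Chars.lower, List.map_map, List.map_map]
  unfold pvClean pvP
  congr 1
  apply List.map_congr_left
  intro c _
  simp only [Function.comp_apply, pvCleanF]
  by_cases h1 : c = '-'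
  · simp [h1]
  · by_cases h2 : c = '_'
    · simp [h2]
    · simp [h1, h2]

-- the word list both programs compute, as one recursion
def pvWords : List Char → List Char → List (List Char)
  | [], buf => if buf.isEmpty then [] else [buf]
  | c :: t, buf =>
    if c = ' ' then (if buf.isEmpty then pvWords t [] else buf :: pvWords t []) else pvWords t (buf ++ [c])

-- A's split() over an alpha-or-space list computes pvWords
theorem pvSplit_go_spec (l : List Char) (h : ∀ c ∈ l, PySem.Chars.isalpha c = true ∨ c = ' ') :
    ∀ (cur : List Char) (acc : List (List Char)),
      PySem.Chars.split₀.go l cur acc = acc.reverse ++ pvWords l cur.reverse := by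
  induction l with
  | nil =>
    intro cur acc
    rw [PySem.Chars.split₀.go, pvWords]
    by_cases hc : cur.isEmpty
    · rw [if_pos hc, if_pos (by simpa using hc)]; simp
    · rw [if_neg hc, if_neg (by simpa using hc)]
      simp
  | cons c t ih =>
    intro cur acc
    have ht : ∀ x ∈ t, PySem.Chars.isalpha x = true ∨ x = ' ' := fun x hx => h x (by simp [hx])
    rcases h c (by simp) with hA | hS
    · rw [PySem.Chars.split₀.go, if_neg (by simp [pvAlpha_not_space c hA]), pvWords,
        if_neg (pvAlpha_ne_space c hA)]
      rw [ih ht (c :: cur) acc]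
      simp
    · subst hS
      rw [PySem.Chars.split₀.go, if_pos (by decide), pvWords, if_pos rfl]
      by_cases hc : cur.isEmpty
      · rw [if_pos hc, if_pos (by simpa using hc), ih ht [] acc]
        rfl
      · rw [if_neg hc, if_neg (by simpa using hc), ih ht [] (cur.reverse :: acc)]
        simp

theorem pvSplit_eq (l : List Char) (h : ∀ c ∈ l, PySem.Chars.isalpha c = true ∨ c = ' ') :
    PySem.Chars.split₀ l = pvWords l [] := by
  rw [PySem.Chars.split₀, pvSplit_go_spec l h [] []]
  rfl

-- B's fold computes pvWords of the cleaned list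
theorem pvFold_spec (l : List Char) :
    ∀ (ws : List (List Char)) (buf : List Char),
      (let st := l.foldl altStep (ws, buf);
       if st.2.isEmpty then st.1 else st.1 ++ [st.2]) = ws ++ pvWords (pvClean l) buf := by
  induction l with
  | nil =>
    intro ws buf
    show (if buf.isEmpty then ws else ws ++ [buf]) = ws ++ pvWords [] buf
    rw [pvWords]
    by_cases hb : buf.isEmpty
    · rw [if_pos hb, if_pos hb]; simp
    · rw [if_neg hb, if_neg hb]
  | cons c t ih =>
    intro ws buf
    rw [List.foldl_cons]
    by_cases hA : PySem.Chars.isalpha c = true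
    · have halpha' : PySem.Chars.isalpha (PySem.Chars.lowerChar c) = true :=
        pvIsalpha_of_islower _ (pvIslower_lowerChar c hA)
      have h1 : altStep (ws, buf) c = (ws, buf ++ [PySem.Chars.lowerChar c]) := by
        rw [altStep, if_pos hA]
      have hclean : pvClean (c :: t) = PySem.Chars.lowerChar c :: pvClean t := by
        unfold pvClean
        rw [List.map_cons]
        have hcf : pvCleanF c = PySem.Chars.lowerChar c := by
          rw [pvCleanF, if_neg (pvAlpha_ne_dash c hA)]
        rw [hcf, List.filter_cons_of_pos (by simp [pvP, halpha'])]
      rw [h1, ih ws (buf ++ [PySem.Chars.lowerChar c]), hclean, pvWords,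
        if_neg (pvAlpha_ne_space _ halpha')]
    · by_cases hS : (c == ' ' || c == '-' || c == '_') = true
      · have hcf : pvCleanF c = ' ' := by
          simp only [Bool.or_eq_true, beq_iff_eq] at hS
          rcases hS with (h1 | h1) | h1 <;> subst h1 <;> decide
        have hclean : pvClean (c :: t) = ' ' :: pvClean t := by
          unfold pvClean
          rw [List.map_cons, hcf, List.filter_cons_of_pos (by decide)]
        have h1 : altStep (ws, buf) c
            = if buf.isEmpty then (ws, buf) else (ws ++ [buf], []) := by
          rw [altStep, if_neg (by simp [hA]), if_pos hS]
        rw [h1, hclean, pvWords, if_pos rfl]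
        by_cases hb : buf.isEmpty
        · rw [if_pos hb, if_pos hb, ih ws buf]
          have : buf = [] := List.isEmpty_iff.mp hb
          subst this
          rfl
        · rw [if_neg hb, if_neg hb, ih (ws ++ [buf]) []]
          simp
      · have hcfix : PySem.Chars.lowerChar c = c :=
          pvLowerChar_of_not_alpha c (Bool.not_eq_true _ ▸ (by simpa using hA))
        have hS' : (¬ c = ' ' ∧ ¬ c = '-') ∧ ¬ c = '_' := by simpa using hS
        have hA' : PySem.Chars.isalpha c = false := by simpa using hA
        have hcf : pvCleanF c = c := by
          rw [pvCleanF, if_neg (by rcases hS' with ⟨⟨h1, h2⟩, h3⟩; tauto), hcfix]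
        have hpf : pvP c = false := by
          rw [pvP, hA']
          simpa using hS'.1.1
        have hclean : pvClean (c :: t) = pvClean t := by
          unfold pvClean
          rw [List.map_cons, hcf, List.filter_cons_of_neg (by simp [hpf])]
        have h1 : altStep (ws, buf) c = (ws, buf) := by
          rw [altStep, if_neg (by simp [hA]), if_neg (by simp [hS])]
        rw [h1, ih ws buf, hclean]

-- every word pvWords yields from a lowercase-or-space list is nonempty and all-lowercase
theorem pvWords_sound (l : List Char)
    (hl : ∀ c ∈ l, PySem.Chars.islower c = true ∨ c = ' ') :
    ∀ (buf : List Char), (∀ c ∈ buf, PySem.Chars.islower c = true) →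
      ∀ w ∈ pvWords l buf, w ≠ [] ∧ ∀ c ∈ w, PySem.Chars.islower c = true := by
  induction l with
  | nil =>
    intro buf hbuf w hw
    rw [pvWords] at hw
    by_cases hb : buf.isEmpty
    · rw [if_pos hb] at hw; simp at hw
    · rw [if_neg hb] at hw
      simp only [List.mem_singleton] at hw
      subst hw
      exact ⟨by simpa [List.isEmpty_iff] using hb, hbuf⟩
  | cons c t ih =>
    intro buf hbuf w hw
    have ht : ∀ x ∈ t, PySem.Chars.islower x = true ∨ x = ' ' := fun x hx => hl x (by simp [hx])
    rw [pvWords] at hw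
    by_cases hsp : c = ' '
    · rw [if_pos hsp] at hw
      by_cases hb : buf.isEmpty
      · rw [if_pos hb] at hw
        exact ih ht [] (by simp) w hw
      · rw [if_neg hb] at hw
        rcases List.mem_cons.mp hw with rfl | hw'
        · exact ⟨by simpa [List.isEmpty_iff] using hb, hbuf⟩
        · exact ih ht [] (by simp) w hw'
    · rw [if_neg hsp] at hw
      have hc : PySem.Chars.islower c = true := by
        rcases hl c (by simp) with h | h
        · exact h
        · exact absurd h hsp
      refine ih ht (buf ++ [c]) ?_ w hw
      intro x hx
      rcases List.mem_append.mp hx with hx | hx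
      · exact hbuf x hx
      · simpa [List.mem_singleton.mp hx] using hc

-- chars of pvClean are lowercase or space
theorem pvClean_chars (l : List Char) :
    ∀ c ∈ pvClean l, PySem.Chars.islower c = true ∨ c = ' ' := by
  intro c hc
  unfold pvClean at hc
  rcases List.mem_filter.mp hc with ⟨hmem, hp⟩
  rcases List.mem_map.mp hmem with ⟨x, _, rfl⟩
  simp only [pvP, Bool.or_eq_true, beq_iff_eq] at hp
  rcases hp with hp | hp
  · left
    unfold pvCleanF at hp ⊢
    by_cases hay : PySem.Chars.isalpha (if x = '-' ∨ x = '_' then ' ' else x) = true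
    · exact pvIslower_lowerChar _ hay
    · rw [pvLowerChar_of_not_alpha _ (by simpa using hay)] at hp
      exact absurd hp hay
  · right; exact hp

theorem pvClean_alpha_or_space (l : List Char) :
    ∀ c ∈ pvClean l, PySem.Chars.isalpha c = true ∨ c = ' ' := by
  intro c hc
  rcases pvClean_chars l c hc with h | h
  · exact Or.inl (pvIsalpha_of_islower c h)
  · exact Or.inr h

-- one-step unfoldings of pyTitleGo
theorem pvTitle_cons_alpha_true (c : Char) (r : List Char)
    (h : PySem.Chars.isalpha c = true) :
    pyTitleGo (c :: r) true = PySem.Chars.lowerChar c :: pyTitleGo r true := by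
  simp [pyTitleGo, h]

theorem pvTitle_cons_alpha_false (c : Char) (r : List Char)
    (h : PySem.Chars.isalpha c = true) :
    pyTitleGo (c :: r) false = PySem.Chars.upperChar c :: pyTitleGo r true := by
  simp [pyTitleGo, h]

theorem pvTitle_cons_notalpha (c : Char) (r : List Char) (b : Bool)
    (h : PySem.Chars.isalpha c = false) :
    pyTitleGo (c :: r) b = c :: pyTitleGo r false := by
  simp [pyTitleGo, h]

-- title over a lowercase tail is the identity
theorem pvTitle_inner (w : List Char) (hw : ∀ c ∈ w, PySem.Chars.islower c = true) :
    ∀ rest, pyTitleGo (w ++ rest) true = w ++ pyTitleGo rest true := by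
  induction w with
  | nil => intro rest; rfl
  | cons c r ih =>
    intro rest
    have hc := hw c (by simp)
    rw [List.cons_append, pvTitle_cons_alpha_true c _ (pvIsalpha_of_islower c hc),
      pvLowerChar_of_islower c hc, ih (fun x hx => hw x (by simp [hx])) rest, List.cons_append]

-- List.intercalate unfolding facts (not present in Mathlib under these shapes)
theorem pvInter_singleton (a : List Char) : [' '].intercalate [a] = a := by
  simp [List.intercalate]

theorem pvInter_cons_cons (a b : List Char) (t : List (List Char)) :
    [' '].intercalate (a :: b :: t) = a ++ [' '] ++ [' '].intercalate (b :: t) := by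
  simp [List.intercalate, List.intersperse]

-- title of " ".join(ws) capitalizes each word, for nonempty all-lowercase words
theorem pvTitle_join (ws : List (List Char))
    (h : ∀ w ∈ ws, w ≠ [] ∧ ∀ c ∈ w, PySem.Chars.islower c = true) :
    pyTitleGo (PySem.Chars.join [' '] ws) false = PySem.Chars.join [' '] (ws.map altCap) := by
  induction ws with
  | nil => rfl
  | cons w t ih =>
    obtain ⟨hne, hlow⟩ := h w (by simp)
    obtain ⟨c, r, rfl⟩ := List.exists_cons_of_ne_nil hne
    have hc := hlow c (by simp)
    have hr : ∀ x ∈ r, PySem.Chars.islower x = true := fun x hx => hlow x (by simp [hx])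
    cases t with
    | nil =>
      show pyTitleGo ([' '].intercalate [c :: r]) false = [' '].intercalate [altCap (c :: r)]
      rw [pvInter_singleton, pvInter_singleton,
        pvTitle_cons_alpha_false c r (pvIsalpha_of_islower c hc)]
      have h0 := pvTitle_inner r hr []
      simp only [List.append_nil] at h0
      rw [h0, altCap]
      simp [pyTitleGo]
    | cons w' t' =>
      have ih' : pyTitleGo ([' '].intercalate (w' :: t')) false
          = [' '].intercalate (List.map altCap (w' :: t')) := ih (fun x hx => h x (by simp [hx]))
      show pyTitleGo ([' '].intercalate ((c :: r) :: w' :: t')) false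
          = [' '].intercalate (List.map altCap ((c :: r) :: w' :: t'))
      rw [pvInter_cons_cons, List.append_assoc, List.cons_append,
        pvTitle_cons_alpha_false c _ (pvIsalpha_of_islower c hc),
        pvTitle_inner r hr ([' '] ++ [' '].intercalate (w' :: t')), List.singleton_append,
        pvTitle_cons_notalpha ' ' _ true (by decide), ih']
      simp [pvInter_cons_cons, altCap]

-- ===== VERDICT (by name: the statement is the Claim_ definition above) =====
theorem parse_handwriting_spec : Claim_equal_parse_handwriting := by
  intro s _
  unfold Spec_parse_handwriting parse_handwriting parse_handwriting_alt
  have hfilt := pvFiltered_eq s.toList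
  have hW : PySem.Chars.split₀ (pvClean s.toList) = pvWords (pvClean s.toList) [] :=
    pvSplit_eq _ (pvClean_alpha_or_space s.toList)
  have hB := pvFold_spec s.toList [] []
  simp only [List.nil_append] at hB
  have hsound : ∀ w ∈ pvWords (pvClean s.toList) [], w ≠ [] ∧ ∀ c ∈ w, PySem.Chars.islower c = true :=
    pvWords_sound (pvClean s.toList) (pvClean_chars s.toList) [] (by simp)
  have htitle := pvTitle_join (pvWords (pvClean s.toList) []) hsound
  generalize hWdef : pvWords (pvClean s.toList) [] = W at hW hB hsound htitle
  simp only [hfilt, hW, hB, htitle]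
  cases W with
  | nil => rfl
  | cons w t =>
    obtain ⟨hne, _⟩ := hsound w (List.mem_cons_self ..)
    obtain ⟨c, r, rfl⟩ := List.exists_cons_of_ne_nil hne
    have hlen : (PySem.Chars.join [' '] (List.map altCap ((c :: r) :: t))).length ≠ 0 := by
      rw [PySem.Chars.join, List.map_cons]
      cases t with
      | nil => simp [pvInter_singleton, altCap]
      | cons w' t' => simp [pvInter_cons_cons, altCap]
    rw [if_neg hlen, if_neg (by simp)]
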